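-- pv_equiv track=rewrite | github.com/cessen/text_encoding | encoding_tables/whatwg/generate_big5.py | deduped_table
-- ===== SOURCE A (Python) =====
-- def deduped_table(table):
--     """ De-deplicate the codepoint entries in the from-disk table according to
--         WHATWG specs.
--     """
--     tmp_table_1 = [x for x in table]
--
--     # Remove all except the _last_ entries for code points U+2550, U+255E,
--     # U+2561, U+256A, U+5341, and U+5345.
--     tmp_table_1.reverse()
--     tmp_table_2 = []
--     seen = set()
--     for (index, codepoint) in tmp_table_1:
--         if codepoint not in seen:
--             if codepoint in [0x2550, 0x255E, 0x2561, 0x256A, 0x5341, 0x5345]: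
--                 seen.add(codepoint)
--             tmp_table_2 += [(index, codepoint)]
--     tmp_table_2.reverse()
--
--     # For the rest, remove all except the _first_ entries.
--     new_table = []
--     seen = set()
--     for (index, codepoint) in tmp_table_2:
--         if codepoint not in seen:
--             seen.add(codepoint)
--             new_table += [(index, codepoint)]
--
--     return new_table
-- ===== SOURCE B (Python) =====
-- SPECIALS = (0x2550, 0x255E, 0x2561, 0x256A, 0x5341, 0x5345)
--
-- def deduped_table(table):
--     """ De-duplicate: keep the last entry for the six special codepoints,
--         the first entry for every other codepoint, in original order.
--         Two forward passes: count the special codepoints, then emit. """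
--     remaining = {}
--     for _, codepoint in table:
--         if codepoint in SPECIALS:
--             remaining[codepoint] = remaining.get(codepoint, 0) + 1
--     new_table = []
--     seen = set()
--     for index, codepoint in table:
--         if codepoint in SPECIALS:
--             remaining[codepoint] -= 1
--             if remaining[codepoint] == 0:
--                 new_table.append((index, codepoint))
--         elif codepoint not in seen:
--             seen.add(codepoint)
--             new_table.append((index, codepoint))
--     return new_table
-- ===== Notes on version B (the rewrite author's own statement) =====
-- stated objective: simpler
-- what changed: A copies the table, reverses it, dedups specials keeping their first-in-reverse (= last) occurrence, reverses again, then dedups keeping first occurrences; B makes two forward passes: it counts the six special codepoints, then emits a special entry when its remaining count hits zero (its last occurrence) and any other entry on first sight, with no list reversals.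
import Mathlib
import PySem

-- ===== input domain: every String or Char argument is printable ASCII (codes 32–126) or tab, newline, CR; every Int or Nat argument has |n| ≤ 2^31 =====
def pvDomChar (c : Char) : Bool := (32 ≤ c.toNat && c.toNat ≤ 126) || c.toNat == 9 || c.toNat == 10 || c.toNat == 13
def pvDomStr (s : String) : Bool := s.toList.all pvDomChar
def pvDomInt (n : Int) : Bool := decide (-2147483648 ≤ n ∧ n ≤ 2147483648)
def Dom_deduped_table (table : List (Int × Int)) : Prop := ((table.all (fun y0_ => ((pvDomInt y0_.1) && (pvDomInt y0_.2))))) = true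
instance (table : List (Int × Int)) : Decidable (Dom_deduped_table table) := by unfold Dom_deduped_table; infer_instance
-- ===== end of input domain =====

-- B replaces A's reverse/dedup/reverse/dedup pipeline by two forward passes (count the six
-- special codepoints, then emit last occurrence for them / first for the rest); objective: simpler.

-- ===== PORT A =====
def deduped_table (table : List (Int × Int)) : List (Int × Int) :=
  -- tmp_table_1 = [x for x in table]; tmp_table_1.reverse()
  let tmp_table_1 := (table.map (fun x => x)).reverse
  -- first loop: keep only the last entry for the six special codepoints
  let p1 := tmp_table_1.foldl
    (fun (st : List (Int × Int) × PySem.Set Int) ic =>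
      if PySem.Set.contains st.2 ic.2 = false then
        let seen :=
          if ic.2 ∈ ([0x2550, 0x255E, 0x2561, 0x256A, 0x5341, 0x5345] : List Int) then
            PySem.Set.add st.2 ic.2
          else st.2
        (st.1 ++ [(ic.1, ic.2)], seen)
      else st)
    ([], PySem.Set.empty)
  let tmp_table_2 := p1.1.reverse
  -- second loop: keep the first entry for every codepoint
  let p2 := tmp_table_2.foldl
    (fun (st : List (Int × Int) × PySem.Set Int) ic =>
      if PySem.Set.contains st.2 ic.2 = false then
        (st.1 ++ [(ic.1, ic.2)], PySem.Set.add st.2 ic.2)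
      else st)
    ([], PySem.Set.empty)
  p2.1

-- ===== PORT B =====
def SPECIALS : List Int := [0x2550, 0x255E, 0x2561, 0x256A, 0x5341, 0x5345]

def deduped_table_alt (table : List (Int × Int)) : List (Int × Int) :=
  -- first pass: count the special codepoints
  let remaining := table.foldl
    (fun (d : PySem.Dict Int Int) ic =>
      if ic.2 ∈ SPECIALS then d.insert ic.2 (d.getD ic.2 0 + 1) else d)
    PySem.Dict.empty
  -- second pass: emit a special codepoint when its count runs out (its last entry),
  -- a non-special codepoint when it is first seen
  let p := table.foldl
    (fun (st : List (Int × Int) × PySem.Set Int × PySem.Dict Int Int) ic =>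
      if ic.2 ∈ SPECIALS then
        let rem := st.2.2.insert ic.2 (st.2.2.getD ic.2 0 - 1)
        if rem.getD ic.2 0 = 0 then (st.1 ++ [ic], st.2.1, rem)
        else (st.1, st.2.1, rem)
      else
        if PySem.Set.contains st.2.1 ic.2 = false then
          (st.1 ++ [ic], PySem.Set.add st.2.1 ic.2, st.2.2)
        else st)
    ([], PySem.Set.empty, remaining)
  p.1

-- ===== PRECONDITION & SPEC =====
def Spec_deduped_table (table : List (Int × Int)) (out : List (Int × Int)) : Prop := out = deduped_table_alt table
instance (table : List (Int × Int)) (out : List (Int × Int)) : Decidable (Spec_deduped_table table out) := by unfold Spec_deduped_table; infer_instance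

-- ===== CLAIM (what is proved, stated in full; the proofs are below) =====
def Claim_equal_deduped_table : Prop := ∀ (table : List (Int × Int)), Dom_deduped_table table → Spec_deduped_table table (deduped_table table)

-- ===== LEMMAS AND PROOFS =====

-- recursive characterization of A's first loop: output list and seen set
def pass1rest : PySem.Set Int → List (Int × Int) → List (Int × Int)
  | _, [] => []
  | s, ic :: l =>
    if PySem.Set.contains s ic.2 = false then
      ic :: pass1rest (if ic.2 ∈ SPECIALS then PySem.Set.add s ic.2 else s) l
    else pass1rest s l

def pass1seen : PySem.Set Int → List (Int × Int) → PySem.Set Int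
  | s, [] => s
  | s, ic :: l =>
    if PySem.Set.contains s ic.2 = false then
      pass1seen (if ic.2 ∈ SPECIALS then PySem.Set.add s ic.2 else s) l
    else pass1seen s l

-- recursive characterization of A's second loop
def ded : PySem.Set Int → List (Int × Int) → List (Int × Int)
  | _, [] => []
  | s, ic :: l =>
    if PySem.Set.contains s ic.2 = false then ic :: ded (PySem.Set.add s ic.2) l
    else ded s l

-- forward form of A's first loop (keep an entry unless a later entry has the same special codepoint)
def kl : List (Int × Int) → List (Int × Int)
  | [] => []
  | ic :: l => if ic.2 ∈ SPECIALS ∧ ic.2 ∈ l.map Prod.snd then kl l else ic :: kl l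

-- recursive characterization of B's second loop
def bgo : PySem.Set Int → PySem.Dict Int Int → List (Int × Int) → List (Int × Int)
  | _, _, [] => []
  | s, r, ic :: l =>
    if ic.2 ∈ SPECIALS then
      let r' := r.insert ic.2 (r.getD ic.2 0 - 1)
      if r'.getD ic.2 0 = 0 then ic :: bgo s r' l else bgo s r' l
    else if PySem.Set.contains s ic.2 = false then ic :: bgo (PySem.Set.add s ic.2) r l
    else bgo s r l

theorem pass1_fold (l : List (Int × Int)) : ∀ (acc : List (Int × Int)) (s : PySem.Set Int),
    l.foldl
      (fun (st : List (Int × Int) × PySem.Set Int) ic =>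
        if PySem.Set.contains st.2 ic.2 = false then
          let seen :=
            if ic.2 ∈ ([0x2550, 0x255E, 0x2561, 0x256A, 0x5341, 0x5345] : List Int) then
              PySem.Set.add st.2 ic.2
            else st.2
          (st.1 ++ [(ic.1, ic.2)], seen)
        else st)
      (acc, s) = (acc ++ pass1rest s l, pass1seen s l) := by
  induction l with
  | nil => intro acc s; simp [pass1rest, pass1seen]
  | cons ic l ih =>
    intro acc s
    by_cases hin : ic.2 ∈ s
    · have hc : ¬ (PySem.Set.contains s ic.2 = false) := by simp [hin]
      simp only [List.foldl_cons, pass1rest, pass1seen, if_neg hc]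
      exact ih acc s
    · have hc : PySem.Set.contains s ic.2 = false := by simp [hin]
      simp only [List.foldl_cons, pass1rest, pass1seen, if_pos hc]
      rw [ih]
      simp [SPECIALS]

theorem pass2_fold (l : List (Int × Int)) : ∀ (acc : List (Int × Int)) (s : PySem.Set Int),
    (l.foldl
      (fun (st : List (Int × Int) × PySem.Set Int) ic =>
        if PySem.Set.contains st.2 ic.2 = false then
          (st.1 ++ [(ic.1, ic.2)], PySem.Set.add st.2 ic.2)
        else st)
      (acc, s)).1 = acc ++ ded s l := by
  induction l with
  | nil => intro acc s; simp [ded]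
  | cons ic l ih =>
    intro acc s
    by_cases hin : ic.2 ∈ s
    · have hc : ¬ (PySem.Set.contains s ic.2 = false) := by simp [hin]
      simp only [List.foldl_cons, ded, if_neg hc]
      exact ih acc s
    · have hc : PySem.Set.contains s ic.2 = false := by simp [hin]
      simp only [List.foldl_cons, ded, if_pos hc]
      rw [ih]
      simp

theorem alt_fold (l : List (Int × Int)) :
    ∀ (acc : List (Int × Int)) (s : PySem.Set Int) (r : PySem.Dict Int Int),
    (l.foldl
      (fun (st : List (Int × Int) × PySem.Set Int × PySem.Dict Int Int) ic =>
        if ic.2 ∈ SPECIALS then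
          let rem := st.2.2.insert ic.2 (st.2.2.getD ic.2 0 - 1)
          if rem.getD ic.2 0 = 0 then (st.1 ++ [ic], st.2.1, rem)
          else (st.1, st.2.1, rem)
        else
          if PySem.Set.contains st.2.1 ic.2 = false then
            (st.1 ++ [ic], PySem.Set.add st.2.1 ic.2, st.2.2)
          else st)
      (acc, s, r)).1 = acc ++ bgo s r l := by
  induction l with
  | nil => intro acc s r; simp [bgo]
  | cons ic l ih =>
    intro acc s r
    by_cases hs : ic.2 ∈ SPECIALS
    · simp only [List.foldl_cons, bgo, if_pos hs]
      by_cases h0 : (r.insert ic.2 (r.getD ic.2 0 - 1)).getD ic.2 0 = 0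
      · simp only [if_pos h0]; rw [ih]; simp
      · simp only [if_neg h0]; rw [ih]
    · by_cases hin : ic.2 ∈ s
      · have hc : ¬ (PySem.Set.contains s ic.2 = false) := by simp [hin]
        simp only [List.foldl_cons, bgo, if_neg hs, if_neg hc]
        exact ih acc s r
      · have hc : PySem.Set.contains s ic.2 = false := by simp [hin]
        simp only [List.foldl_cons, bgo, if_neg hs, if_pos hc]
        rw [ih]
        simp

theorem mem_pass1seen (c : Int) : ∀ (l : List (Int × Int)) (s : PySem.Set Int),
    c ∈ pass1seen s l ↔ c ∈ s ∨ (c ∈ SPECIALS ∧ c ∈ l.map Prod.snd) := by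
  intro l
  induction l with
  | nil => intro s; simp [pass1seen]
  | cons ic l ih =>
    intro s
    by_cases hin : ic.2 ∈ s
    · have hc : ¬ (PySem.Set.contains s ic.2 = false) := by simp [hin]
      simp only [pass1seen, if_neg hc]
      rw [ih, List.map_cons]
      constructor
      · rintro (h | ⟨h1, h2⟩)
        · exact Or.inl h
        · exact Or.inr ⟨h1, List.mem_cons.2 (Or.inr h2)⟩
      · rintro (h | ⟨h1, h2⟩)
        · exact Or.inl h
        · rcases List.mem_cons.1 h2 with h2 | h2
          · exact Or.inl (h2 ▸ hin)
          · exact Or.inr ⟨h1, h2⟩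
    · have hc : PySem.Set.contains s ic.2 = false := by simp [hin]
      simp only [pass1seen, if_pos hc]
      by_cases hsp : ic.2 ∈ SPECIALS
      · rw [if_pos hsp, ih, PySem.Set.mem_add, List.map_cons]
        constructor
        · rintro ((h | h) | ⟨h1, h2⟩)
          · exact Or.inl h
          · exact Or.inr ⟨h ▸ hsp, List.mem_cons.2 (Or.inl h)⟩
          · exact Or.inr ⟨h1, List.mem_cons.2 (Or.inr h2)⟩
        · rintro (h | ⟨h1, h2⟩)
          · exact Or.inl (Or.inl h)
          · rcases List.mem_cons.1 h2 with h2 | h2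
            · exact Or.inl (Or.inr h2)
            · exact Or.inr ⟨h1, h2⟩
      · rw [if_neg hsp, ih, List.map_cons]
        constructor
        · rintro (h | ⟨h1, h2⟩)
          · exact Or.inl h
          · exact Or.inr ⟨h1, List.mem_cons.2 (Or.inr h2)⟩
        · rintro (h | ⟨h1, h2⟩)
          · exact Or.inl h
          · rcases List.mem_cons.1 h2 with h2 | h2
            · exact absurd (h2 ▸ h1) hsp
            · exact Or.inr ⟨h1, h2⟩

theorem pass1rest_append (l₁ l₂ : List (Int × Int)) : ∀ (s : PySem.Set Int),
    pass1rest s (l₁ ++ l₂) = pass1rest s l₁ ++ pass1rest (pass1seen s l₁) l₂ := by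
  induction l₁ with
  | nil => intro s; simp [pass1rest, pass1seen]
  | cons ic l ih =>
    intro s
    by_cases hin : ic.2 ∈ s
    · have hc : ¬ (PySem.Set.contains s ic.2 = false) := by simp [hin]
      simp only [List.cons_append, pass1rest, pass1seen, if_neg hc]
      exact ih s
    · have hc : PySem.Set.contains s ic.2 = false := by simp [hin]
      simp only [List.cons_append, pass1rest, pass1seen, if_pos hc]
      rw [ih]

theorem kl_eq : ∀ (l : List (Int × Int)),
    (pass1rest PySem.Set.empty l.reverse).reverse = kl l := by
  intro l
  induction l with
  | nil => simp [pass1rest, kl]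
  | cons ic l ih =>
    rw [show (ic :: l).reverse = l.reverse ++ [ic] by simp, pass1rest_append]
    have hsingle : ∀ s : PySem.Set Int,
        pass1rest s [ic] = if PySem.Set.contains s ic.2 = false then [ic] else [] := by
      intro s
      simp only [pass1rest]
    rw [hsingle]
    have hmem' : ic.2 ∈ pass1seen PySem.Set.empty l.reverse ↔
        (ic.2 ∈ SPECIALS ∧ ic.2 ∈ l.map Prod.snd) := by
      rw [mem_pass1seen]
      simp [PySem.Set.empty]
    simp only [kl]
    by_cases hc : ic.2 ∈ SPECIALS ∧ ic.2 ∈ l.map Prod.snd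
    · have hmem : ic.2 ∈ pass1seen PySem.Set.empty l.reverse := hmem'.2 hc
      rw [if_pos hc, if_neg (by simp; exact hmem :
        ¬ (PySem.Set.contains (pass1seen PySem.Set.empty l.reverse) ic.2 = false))]
      rw [List.append_nil]
      exact ih
    · have hns : ic.2 ∉ pass1seen PySem.Set.empty l.reverse := fun h => hc (hmem'.1 h)
      rw [if_neg hc, if_pos (by simp; exact hns :
        PySem.Set.contains (pass1seen PySem.Set.empty l.reverse) ic.2 = false)]
      rw [List.reverse_append]
      simp only [List.reverse_cons, List.reverse_nil, List.nil_append, List.singleton_append]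
      rw [ih]

-- the invariant-carrying main lemma: A's de-dup of the kept list equals B's counting pass
theorem main_lemma : ∀ (l : List (Int × Int)) (sA sB : PySem.Set Int) (r : PySem.Dict Int Int),
    (∀ c, c ∉ SPECIALS → (c ∈ sA ↔ c ∈ sB)) →
    (∀ c, c ∈ SPECIALS → c ∈ sA → c ∉ l.map Prod.snd) →
    (∀ c, c ∈ SPECIALS → r.getD c 0 = ((l.map Prod.snd).count c : Int)) →
    ded sA (kl l) = bgo sB r l := by
  intro l
  induction l with
  | nil => intro sA sB r _ _ _; simp [kl, ded, bgo]
  | cons ic l ih =>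
    intro sA sB r hns hsp hr
    have hsp' : ∀ c, c ∈ SPECIALS → c ∈ sA → c ∉ l.map Prod.snd := by
      intro c hc hmem h
      exact hsp c hc hmem (List.mem_cons.2 (Or.inr h))
    simp only [kl, bgo]
    by_cases hs : ic.2 ∈ SPECIALS
    · -- special codepoint
      have hrc : r.getD ic.2 0 = ((l.map Prod.snd).count ic.2 : Int) + 1 := by
        rw [hr _ hs]
        simp only [List.map_cons, List.count_cons_self]
        push_cast
        ring
      have hr' : ∀ c, c ∈ SPECIALS →
          (r.insert ic.2 (r.getD ic.2 0 - 1)).getD c 0 = ((l.map Prod.snd).count c : Int) := by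
        intro c hc
        by_cases hceq : c = ic.2
        · subst hceq
          rw [PySem.Dict.getD_insert_self, hrc]
          ring
        · rw [PySem.Dict.getD_insert_of_ne _ _ _ hceq, hr c hc]
          have hne : ¬ ic.2 = c := fun h => hceq h.symm
          simp [hne]
      have hget' : (r.insert ic.2 (r.getD ic.2 0 - 1)).getD ic.2 0 =
          ((l.map Prod.snd).count ic.2 : Int) := hr' _ hs
      rw [if_pos hs]
      by_cases hlater : ic.2 ∈ l.map Prod.snd
      · -- a later occurrence exists: both drop this entry
        have hcne : ((l.map Prod.snd).count ic.2 : Int) ≠ 0 := by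
          have h1 : (l.map Prod.snd).count ic.2 ≠ 0 := by
            intro h0
            exact (List.count_eq_zero.1 h0) hlater
          exact_mod_cast h1
        rw [if_pos ⟨hs, hlater⟩, if_neg (by rw [hget']; exact hcne)]
        exact ih sA sB _ hns hsp' hr'
      · -- last occurrence: both keep this entry
        have hkeep : (r.insert ic.2 (r.getD ic.2 0 - 1)).getD ic.2 0 = 0 := by
          rw [hget']
          exact_mod_cast (List.count_eq_zero.2 hlater)
        rw [if_neg (fun h => hlater h.2), if_pos hkeep]
        simp only [ded]
        have hnotinA : ic.2 ∉ sA := fun h => hsp _ hs h (List.mem_cons.2 (Or.inl rfl))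
        rw [if_pos (by simp [hnotinA] : PySem.Set.contains sA ic.2 = false)]
        congr 1
        refine ih _ sB _ ?_ ?_ hr'
        · intro c hc
          rw [PySem.Set.mem_add]
          constructor
          · rintro (h | h)
            · exact (hns c hc).1 h
            · exact absurd hs (h ▸ hc)
          · exact fun h => Or.inl ((hns c hc).2 h)
        · intro c hc hmem
          rcases (PySem.Set.mem_add sA ic.2 c).1 hmem with h | h
          · exact hsp' c hc h
          · rw [h]; exact hlater
    · -- non-special codepoint: kept by the first pass; first-occurrence rule on both sides
      rw [if_neg (fun h => hs h.1), if_neg hs]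
      simp only [ded]
      have hiff : ic.2 ∈ sA ↔ ic.2 ∈ sB := hns _ hs
      have hcnt : ∀ c, c ∈ SPECIALS → r.getD c 0 = ((l.map Prod.snd).count c : Int) := by
        intro c hc
        rw [hr c hc]
        have hne : c ≠ ic.2 := fun h => hs (h ▸ hc)
        have hne' : ¬ ic.2 = c := fun h => hne h.symm
        simp [hne']
      by_cases hin : ic.2 ∈ sB
      · have hinA : ic.2 ∈ sA := hiff.2 hin
        rw [if_neg (by simp [hinA] : ¬ (PySem.Set.contains sA ic.2 = false)),
          if_neg (by simp [hin] : ¬ (PySem.Set.contains sB ic.2 = false))]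
        exact ih sA sB r hns hsp' hcnt
      · have hinA : ic.2 ∉ sA := fun h => hin (hiff.1 h)
        rw [if_pos (by simp [hinA] : PySem.Set.contains sA ic.2 = false),
          if_pos (by simp [hin] : PySem.Set.contains sB ic.2 = false)]
        congr 1
        refine ih _ _ _ ?_ ?_ hcnt
        · intro c hc
          rw [PySem.Set.mem_add, PySem.Set.mem_add, hns c hc]
        · intro c hc hmem
          rcases (PySem.Set.mem_add sA ic.2 c).1 hmem with h | h
          · exact hsp' c hc h
          · rw [h] at hc; exact absurd hc hs

-- B's first pass computes the multiset of special codepoints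
theorem rem0_getD (table : List (Int × Int)) (c : Int) (hc : c ∈ SPECIALS) :
    (table.foldl
      (fun (d : PySem.Dict Int Int) ic =>
        if ic.2 ∈ SPECIALS then d.insert ic.2 (d.getD ic.2 0 + 1) else d)
      PySem.Dict.empty).getD c 0 = ((table.map Prod.snd).count c : Int) := by
  have h1 : (table.foldl
      (fun (d : PySem.Dict Int Int) ic =>
        if ic.2 ∈ SPECIALS then d.insert ic.2 (d.getD ic.2 0 + 1) else d)
      PySem.Dict.empty)
      = (List.filter (fun x => decide (x.2 ∈ SPECIALS)) table).foldl
        (fun (d : PySem.Dict Int Int) ic => d.insert ic.2 (d.getD ic.2 0 + 1))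
        PySem.Dict.empty :=
    PySem.List.foldl_ite_eq_foldl_filter _ _ _ _
  have h2 : (List.filter (fun x => decide (x.2 ∈ SPECIALS)) table).foldl
        (fun (d : PySem.Dict Int Int) ic => d.insert ic.2 (d.getD ic.2 0 + 1))
        PySem.Dict.empty
      = ((List.filter (fun x => decide (x.2 ∈ SPECIALS)) table).map Prod.snd).foldl
        (fun (d : PySem.Dict Int Int) x => d.insert x (d.getD x 0 + 1))
        PySem.Dict.empty :=
    (List.foldl_map (f := Prod.snd)
      (g := fun (d : PySem.Dict Int Int) x => d.insert x (d.getD x 0 + 1))).symm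
  have h3 : (List.filter (fun x : Int × Int => decide (x.2 ∈ SPECIALS)) table).map Prod.snd
      = (table.map Prod.snd).filter (fun x => decide (x ∈ SPECIALS)) := by
    have hcomp : (fun x : Int × Int => decide (x.2 ∈ SPECIALS))
        = ((fun x : Int => decide (x ∈ SPECIALS)) ∘ Prod.snd) := rfl
    rw [hcomp, List.filter_map]
  rw [h1, h2, h3]
  rw [PySem.Dict.getD_foldl_insert_add_one]
  rw [List.count_filter (by simpa using hc)]
  simp

-- ===== VERDICT (by name: the statement is the Claim_ definition above) =====
theorem deduped_table_spec : Claim_equal_deduped_table := by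
  unfold Claim_equal_deduped_table
  intro table _
  unfold Spec_deduped_table
  show deduped_table table = deduped_table_alt table
  unfold deduped_table deduped_table_alt
  simp only [List.map_id']
  rw [pass1_fold, alt_fold, pass2_fold]
  simp only [List.nil_append]
  rw [kl_eq]
  refine main_lemma table PySem.Set.empty PySem.Set.empty _ (fun c _ => Iff.rfl) ?_ ?_
  · intro c _ h
    exact absurd h (by simp [PySem.Set.empty])
  · intro c hc
    exact rem0_getD table c hc
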